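-- pv_equiv track=rewrite | github.com/LuisHenrique01/sistemas-operacionais | escalonamento_circular.py | qual_processo
-- ===== SOURCE A (Python) =====
-- def qual_processo(vez_processo, tempos_processos):
--     proximo = vez_processo + 1
--     if sum(tempos_processos) <= 0:
--         return 0
--     if proximo >= len(tempos_processos):
--         proximo = 0
--     if tempos_processos[proximo] <= 0:
--         return qual_processo(proximo, tempos_processos)
--     else:
--         return proximo
-- ===== SOURCE B (Python) =====
-- def qual_processo(vez_processo, tempos_processos):
--     if sum(tempos_processos) <= 0:
--         return 0
--     proximo = vez_processo + 1
--     if proximo >= len(tempos_processos):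
--         proximo = 0
--     while tempos_processos[proximo] <= 0:
--         proximo += 1
--         if proximo >= len(tempos_processos):
--             proximo = 0
--     return proximo
-- ===== Notes on version B (the rewrite author's own statement) =====
-- stated objective: idiomatic
-- what changed: Replaces A's tail recursion, which re-computes sum(tempos_processos) on every recursive step, with a single upfront sum check followed by an explicit while-loop using the same >=len reset for wraparound.
import Mathlib
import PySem

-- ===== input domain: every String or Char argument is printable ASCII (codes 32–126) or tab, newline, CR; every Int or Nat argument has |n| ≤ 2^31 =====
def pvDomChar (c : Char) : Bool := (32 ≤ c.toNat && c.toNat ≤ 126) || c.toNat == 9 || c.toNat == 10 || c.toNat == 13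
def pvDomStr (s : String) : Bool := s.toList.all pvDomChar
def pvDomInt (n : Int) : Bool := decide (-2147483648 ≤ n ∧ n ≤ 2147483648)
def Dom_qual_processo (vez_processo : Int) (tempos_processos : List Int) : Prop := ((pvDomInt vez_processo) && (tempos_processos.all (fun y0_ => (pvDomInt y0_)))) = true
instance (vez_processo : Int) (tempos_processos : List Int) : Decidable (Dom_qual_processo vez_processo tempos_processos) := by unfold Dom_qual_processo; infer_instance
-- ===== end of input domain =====

-- B replaces A's tail recursion (which re-sums the whole list at every step) by one upfront
-- sum check and an explicit while-loop with the same `>= len` reset (objective: idiomatic).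

-- ===== PORT A =====
-- A's recursion, made total with fuel (a totality guard only: on Pre_ inputs the fuel
-- 2*len+2 exceeds the real recursion depth; fuel 0 returns junk 0, never reached there).
def goA (tempos_processos : List Int) : Nat → Int → Int
  | 0, _ => 0
  | fuel+1, vez_processo =>
    let proximo := vez_processo + 1
    if tempos_processos.sum ≤ 0 then 0
    else
      let proximo := if proximo ≥ (tempos_processos.length : Int) then 0 else proximo
      match PySem.List.pyGet? tempos_processos proximo with
      | none => 0  -- IndexError in Python; excluded by Pre_
      | some v => if v ≤ 0 then goA tempos_processos fuel proximo else proximo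

def qual_processo (vez_processo : Int) (tempos_processos : List Int) : Int :=
  goA tempos_processos (2 * tempos_processos.length + 2) vez_processo

-- ===== PORT B =====
-- B's while-loop, made total with the same fuel bound (fuel 0 returns junk 0).
def goB (tempos_processos : List Int) : Nat → Int → Int
  | 0, _ => 0
  | fuel+1, proximo =>
    match PySem.List.pyGet? tempos_processos proximo with
    | none => 0  -- IndexError in Python; excluded by Pre_
    | some v =>
      if v ≤ 0 then
        goB tempos_processos fuel
          (if proximo + 1 ≥ (tempos_processos.length : Int) then 0 else proximo + 1)
      else proximo

def qual_processo_alt (vez_processo : Int) (tempos_processos : List Int) : Int :=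
  if tempos_processos.sum ≤ 0 then 0
  else
    goB tempos_processos (2 * tempos_processos.length + 2)
      (if vez_processo + 1 ≥ (tempos_processos.length : Int) then 0 else vez_processo + 1)

-- ===== PRECONDITION & SPEC =====
-- Pre_ excludes exactly the inputs where Python A raises: when the list has a positive sum
-- and vez_processo+1 < -len(tempos_processos), the first subscript is out of range even for
-- Python's negative indexing, so A (and B alike) raises IndexError.
def Pre_qual_processo (vez_processo : Int) (tempos_processos : List Int) : Prop :=
  tempos_processos.sum ≤ 0 ∨ -(tempos_processos.length : Int) ≤ vez_processo + 1
instance (vez_processo : Int) (tempos_processos : List Int) : Decidable (Pre_qual_processo vez_processo tempos_processos) := by unfold Pre_qual_processo; infer_instance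

def pvWitness_qual_processo : Int × List Int := (0, [0, 2, 1])

def Spec_qual_processo (vez_processo : Int) (tempos_processos : List Int) (out : Int) : Prop := out = qual_processo_alt vez_processo tempos_processos
instance (vez_processo : Int) (tempos_processos : List Int) (out : Int) : Decidable (Spec_qual_processo vez_processo tempos_processos out) := by unfold Spec_qual_processo; infer_instance

-- ===== CLAIM (what is proved, stated in full; the proofs are below) =====
def Claim_equal_qual_processo : Prop := ∀ (vez_processo : Int) (tempos_processos : List Int), Dom_qual_processo vez_processo tempos_processos → Pre_qual_processo vez_processo tempos_processos → Spec_qual_processo vez_processo tempos_processos (qual_processo vez_processo tempos_processos)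

-- ===== LEMMAS AND PROOFS =====

-- One recursion step of A equals one loop step of B, for every fuel and start index
-- (the fuel-0 junk values coincide), provided the sum is positive.
theorem goA_eq_goB (tempos : List Int) (h : ¬ tempos.sum ≤ 0) :
    ∀ (fuel : Nat) (vez : Int),
      goA tempos (fuel+1) vez
        = goB tempos (fuel+1) (if vez + 1 ≥ (tempos.length : Int) then 0 else vez + 1) := by
  intro fuel
  induction fuel with
  | zero =>
    intro vez
    rw [goA.eq_2, goB.eq_2]
    simp only [h, if_false]
    cases PySem.List.pyGet? tempos (if vez + 1 ≥ (tempos.length : Int) then 0 else vez + 1) with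
    | none => rfl
    | some v =>
      by_cases hv : v ≤ 0
      · simp only [hv, if_true, goA, goB]
      · simp only [hv, if_false]
  | succ f ih =>
    intro vez
    rw [goA.eq_2, goB.eq_2]
    simp only [h, if_false]
    cases PySem.List.pyGet? tempos (if vez + 1 ≥ (tempos.length : Int) then 0 else vez + 1) with
    | none => rfl
    | some v =>
      by_cases hv : v ≤ 0
      · simp only [hv, if_true]
        exact ih _
      · simp only [hv, if_false]

-- ===== VERDICT (by name: the statement is the Claim_ definition above) =====
theorem qual_processo_spec : Claim_equal_qual_processo := by
  intro vez tempos _ _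
  unfold Spec_qual_processo qual_processo qual_processo_alt
  by_cases hs : tempos.sum ≤ 0
  · simp [goA, hs]
  · simp only [hs, if_false]
    exact goA_eq_goB tempos hs (2 * tempos.length + 1) vez
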